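-- pv_equiv track=rewrite | github.com/Zysishuiyears/Graph-Theory-B-coloring-of-Cartesian-products | src/active/general_product_search.py | canonical_relabel_key
-- ===== SOURCE A (Python) =====
-- from typing import Dict, List, Optional, Set, Tuple
--
-- def canonical_relabel_key(colors: List[int]) -> Tuple[int, ...]:
--     mapping: Dict[int, int] = {}
--     next_color = 0
--     relabeled = []
--     for color in colors:
--         if color not in mapping:
--             mapping[color] = next_color
--             next_color += 1
--         relabeled.append(mapping[color])
--     return tuple(relabeled)
-- ===== SOURCE B (Python) =====
-- from typing import Dict, List, Tuple
--
--
-- def canonical_relabel_key(colors: List[int]) -> Tuple[int, ...]: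
--     # Rank-by-first-occurrence: overwrite from the back so each color keeps its
--     # earliest index, sort the distinct colors by that index, rank them, map.
--     first: Dict[int, int] = {c: i for i, c in reversed(list(enumerate(colors)))}
--     order = sorted(first, key=first.__getitem__)
--     rank: Dict[int, int] = {c: r for r, c in enumerate(order)}
--     return tuple(rank[c] for c in colors)
-- ===== Notes on version B (the rewrite author's own statement) =====
-- stated objective: alternative
-- what changed: Replaces A's single pass that assigns fresh labels with an incrementing counter by a rank-by-first-occurrence scheme: a reverse-overwrite dict comprehension records each color's first index, the distinct colors are sorted by that index and ranked, and a final map emits the labels; equivalent because canonical labels are exactly the ranks of first-occurrence positions.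
import Mathlib
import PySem

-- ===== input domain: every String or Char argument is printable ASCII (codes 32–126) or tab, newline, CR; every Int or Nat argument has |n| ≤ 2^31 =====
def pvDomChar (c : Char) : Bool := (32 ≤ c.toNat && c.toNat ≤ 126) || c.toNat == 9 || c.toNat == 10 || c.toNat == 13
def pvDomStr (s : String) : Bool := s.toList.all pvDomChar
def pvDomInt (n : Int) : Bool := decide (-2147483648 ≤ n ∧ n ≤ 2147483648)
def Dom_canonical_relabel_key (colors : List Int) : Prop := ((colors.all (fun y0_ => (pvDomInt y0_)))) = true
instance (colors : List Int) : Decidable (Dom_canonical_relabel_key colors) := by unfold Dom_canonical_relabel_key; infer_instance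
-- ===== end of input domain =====

-- B replaces A's incremental build-and-emit loop by a rank-by-first-occurrence scheme:
-- a reverse-overwrite pass records each color's first index, the distinct colors are
-- sorted by that index and ranked, and the result is emitted by a final map (alternative).


-- ===== PORT A =====
-- Transliteration of A: one loop keeping (mapping, next_color, relabeled);
-- 'mapping[color]' after the if never raises (the key is present), so getD 0 is exact.
def canonical_relabel_key (colors : List Int) : List Int :=
  (colors.foldl
    (fun (st : PySem.Dict Int Int × Int × List Int) color =>
      let p := if !(st.1.contains color) then (st.1.insert color st.2.1, st.2.1 + 1)
               else (st.1, st.2.1)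
      (p.1, p.2, st.2.2 ++ [(p.1.get? color).getD 0]))
    ((PySem.Dict.empty : PySem.Dict Int Int), (0 : Int), ([] : List Int))).2.2

-- ===== PORT B =====
-- Transliteration of B: 'first' = {c: i for i, c in reversed(list(enumerate(colors)))}
-- (later inserts of the same key overwrite, so the earliest index wins), 'order' =
-- sorted(first, key=first.__getitem__) (sorting a dict iterates its keys), 'rank' =
-- {c: r for r, c in enumerate(order)}, then one mapping pass.  'first[c]' / 'rank[c]'
-- never raise (every c of colors is a key of both dicts), so getD 0 is exact.
def canonical_relabel_key_alt (colors : List Int) : List Int :=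
  let first : PySem.Dict Int Int :=
    ((PySem.List.enumerate colors).reverse).foldl (fun d p => d.insert p.2 p.1) PySem.Dict.empty
  let order := PySem.List.sorted first.keys (fun c => (first.get? c).getD 0) false
  let rank : PySem.Dict Int Int :=
    (PySem.List.enumerate order).foldl (fun d p => d.insert p.2 p.1) PySem.Dict.empty
  colors.map (fun c => (rank.get? c).getD 0)

-- ===== PRECONDITION & SPEC =====
def Spec_canonical_relabel_key (colors : List Int) (out : List Int) : Prop := out = canonical_relabel_key_alt colors
instance (colors : List Int) (out : List Int) : Decidable (Spec_canonical_relabel_key colors out) := by unfold Spec_canonical_relabel_key; infer_instance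

-- ===== CLAIM (what is proved, stated in full; the proofs are below) =====
def Claim_equal_canonical_relabel_key : Prop := ∀ (colors : List Int), Dom_canonical_relabel_key colors → Spec_canonical_relabel_key colors (canonical_relabel_key colors)

-- ===== LEMMAS AND PROOFS =====

/-- A's loop body, named so the induction can rewrite it step by step
(`canonical_relabel_key` unfolds to a fold of this function definitionally). -/
def stepA (st : PySem.Dict Int Int × Int × List Int) (color : Int) :
    PySem.Dict Int Int × Int × List Int :=
  let p := if !(st.1.contains color) then (st.1.insert color st.2.1, st.2.1 + 1)
           else (st.1, st.2.1)
  (p.1, p.2, st.2.2 ++ [(p.1.get? color).getD 0])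

lemma stepA_mem (d : PySem.Dict Int Int) (n : Int) (acc : List Int) (c : Int)
    (h : d.contains c = true) :
    stepA (d, n, acc) c = (d, n, acc ++ [(d.get? c).getD 0]) := by
  simp [stepA, h]

lemma stepA_notMem (d : PySem.Dict Int Int) (n : Int) (acc : List Int) (c : Int)
    (h : d.contains c = false) :
    stepA (d, n, acc) c = (d.insert c n, n + 1, acc ++ [n]) := by
  simp [stepA, h, PySem.Dict.get?_insert_self]

/-- The dedup of the processed prefix, as A's loop grows it. -/
def seenAfter (seen : List Int) (colors : List Int) : List Int :=
  colors.foldl (fun s c => if c ∈ s then s else s ++ [c]) seen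

/-- What A's loop emits, phrased over the list of already-seen colors. -/
def relabelFrom (seen : List Int) : List Int → List Int
  | [] => []
  | c :: rest =>
      if c ∈ seen then ((seen.idxOf c : Int)) :: relabelFrom seen rest
      else ((seen.length : Int)) :: relabelFrom (seen ++ [c]) rest

lemma seenAfter_prefix : ∀ (colors seen : List Int), seen <+: seenAfter seen colors := by
  intro colors
  induction colors with
  | nil => intro seen; simp [seenAfter]
  | cons c rest ih =>
      intro seen
      by_cases h : c ∈ seen
      · simpa [seenAfter, h] using ih seen
      · exact List.IsPrefix.trans (l₂ := seen ++ [c]) ⟨[c], rfl⟩ (by simpa [seenAfter, h] using ih (seen ++ [c]))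

lemma relabelFrom_eq_map : ∀ (colors seen : List Int),
    relabelFrom seen colors = colors.map (fun c => ((seenAfter seen colors).idxOf c : Int)) := by
  intro colors
  induction colors with
  | nil => intro seen; simp [relabelFrom, seenAfter]
  | cons c rest ih =>
      intro seen
      by_cases h : c ∈ seen
      · have hsA : seenAfter seen (c :: rest) = seenAfter seen rest := by simp [seenAfter, h]
        have hidx : (seenAfter seen rest).idxOf c = seen.idxOf c := by
          obtain ⟨t, ht⟩ := seenAfter_prefix rest seen
          rw [← ht, List.idxOf_append_of_mem h]
        simp [relabelFrom, h, hsA, ih seen, hidx]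
      · have hsA : seenAfter seen (c :: rest) = seenAfter (seen ++ [c]) rest := by
          simp [seenAfter, h]
        have hidx : (seenAfter (seen ++ [c]) rest).idxOf c = seen.length := by
          obtain ⟨t, ht⟩ := seenAfter_prefix rest (seen ++ [c])
          rw [← ht, List.append_assoc, List.idxOf_append_of_notMem h]
          simp
        simp [relabelFrom, h, hsA, ih (seen ++ [c]), hidx]

/-- A's loop, run from a dict faithful to `seen`, emits `relabelFrom seen`. -/
lemma foldA_eq : ∀ (colors : List Int) (d : PySem.Dict Int Int) (seen acc : List Int),
    seen.Nodup →
    (∀ x, d.contains x = decide (x ∈ seen)) →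
    (∀ x, d.get? x = if x ∈ seen then some ((seen.idxOf x : Int)) else none) →
    (colors.foldl stepA (d, (seen.length : Int), acc)).2.2 = acc ++ relabelFrom seen colors := by
  intro colors
  induction colors with
  | nil => intro d seen acc _ _ _; simp [relabelFrom]
  | cons c rest ih =>
      intro d seen acc hnd hcont hget
      by_cases h : c ∈ seen
      · have hc : d.contains c = true := by rw [hcont]; simpa using h
        have hv : (d.get? c).getD 0 = ((seen.idxOf c : Int)) := by rw [hget]; simp [h]
        rw [List.foldl_cons, stepA_mem _ _ _ _ hc, hv,
          ih d seen (acc ++ [((seen.idxOf c : Int))]) hnd hcont hget]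
        simp [relabelFrom, h]
      · have hc : d.contains c = false := by rw [hcont]; simpa using h
        have hnd' : (seen ++ [c]).Nodup := by
          simp [List.nodup_append, hnd]
          intro a ha he
          exact h (he ▸ ha)
        have hcont' : ∀ x, (d.insert c (seen.length : Int)).contains x
            = decide (x ∈ seen ++ [c]) := by
          intro x
          rw [PySem.Dict.contains_insert, hcont]
          by_cases hx : x = c <;> simp [hx]
        have hget' : ∀ x, (d.insert c (seen.length : Int)).get? x
            = if x ∈ seen ++ [c] then some (((seen ++ [c]).idxOf x : Int)) else none := by
          intro x
          by_cases hx : x = c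
          · subst hx
            rw [PySem.Dict.get?_insert_self]
            simp [List.idxOf_append_of_notMem h]
          · rw [PySem.Dict.get?_insert_of_ne _ _ hx, hget]
            by_cases hxs : x ∈ seen
            · simp [hxs, List.idxOf_append_of_mem hxs]
            · simp [hxs, hx]
        have hlen : ((seen.length : Int) + 1) = (((seen ++ [c]).length : Int)) := by simp
        rw [List.foldl_cons, stepA_notMem _ _ _ _ hc, hlen,
          ih (d.insert c (seen.length : Int)) (seen ++ [c])
            (acc ++ [((seen.length : Int))]) hnd' hcont' hget']
        simp [relabelFrom, h]

lemma seenAfter_nil_eq_dedup (colors : List Int) :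
    seenAfter [] colors = PySem.List.dedup colors := by
  have h : (fun (s : List Int) (c : Int) => if c ∈ s then s else s ++ [c]) = PySem.Set.add := by
    funext s c
    simp [PySem.Set.add]
  simp [seenAfter, h, PySem.Set.ofList]

/-- A's fold computes, position by position, the canonical index of each color. -/
lemma a_eq_map (colors : List Int) :
    canonical_relabel_key colors
      = colors.map (fun c => (((PySem.List.dedup colors).idxOf c : Int))) := by
  have hA : canonical_relabel_key colors = relabelFrom [] colors := by
    unfold canonical_relabel_key
    exact foldA_eq colors PySem.Dict.empty [] [] (by simp)
      (fun x => by simp [PySem.Dict.contains, PySem.Dict.empty])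
      (fun x => by simp [PySem.Dict.get?, PySem.Dict.empty])
  rw [hA, relabelFrom_eq_map, seenAfter_nil_eq_dedup]

/-- B's reverse-overwrite dict, characterised: each color maps to its FIRST index
(the insert of the earliest occurrence is performed last and overwrites). -/
lemma get?_revEnumFold : ∀ (l : List Int) (s : Int) (d : PySem.Dict Int Int) (c : Int),
    (((PySem.List.enumerate l s).reverse).foldl (fun d p => d.insert p.2 p.1) d).get? c
      = if c ∈ l then some (s + (l.idxOf c : Int)) else d.get? c := by
  intro l
  induction l with
  | nil => intro s d c; simp [PySem.List.enumerate_nil]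
  | cons x rest ih =>
      intro s d c
      rw [PySem.List.enumerate_cons, List.reverse_cons, List.foldl_append]
      simp only [List.foldl_cons, List.foldl_nil]
      by_cases hx : c = x
      · subst hx
        rw [PySem.Dict.get?_insert_self]
        simp
      · rw [PySem.Dict.get?_insert_of_ne _ _ hx, ih (s + 1) d c]
        by_cases hr : c ∈ rest
        · rw [List.idxOf_cons_ne _ (by simpa using Ne.symm hx)]
          simp only [List.mem_cons, hx, hr, false_or, if_pos]
          congr 1
          push_cast
          ring
        · simp [hx, hr]

/-- B's index table (`rank`), characterised over a duplicate-free `order`. -/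
lemma get?_buildMap : ∀ (l : List Int) (s : Int) (d : PySem.Dict Int Int) (c : Int),
    l.Nodup →
    ((PySem.List.enumerate l s).foldl (fun d p => d.insert p.2 p.1) d).get? c
      = if c ∈ l then some (s + (l.idxOf c : Int)) else d.get? c := by
  intro l
  induction l with
  | nil => intro s d c _; simp [PySem.List.enumerate_nil]
  | cons h t ih =>
      intro s d c hnd
      rw [PySem.List.enumerate_cons]
      simp only [List.foldl_cons]
      rw [ih (s + 1) (d.insert h s) c hnd.of_cons]
      by_cases hct : c ∈ t
      · have hch : c ≠ h := fun he => (List.nodup_cons.1 hnd).1 (he ▸ hct)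
        rw [List.idxOf_cons_ne _ (Ne.symm hch)]
        simp [hct, List.mem_cons, hch]
        ring
      · by_cases hch : c = h
        · subst hch
          rw [PySem.Dict.get?_insert_self]
          simp [hct, List.idxOf_cons_eq _ rfl]
        · rw [PySem.Dict.get?_insert_of_ne _ _ hch]
          simp [hct, hch]

/-- `dedup` lists the distinct colors in strictly increasing order of first index. -/
lemma pairwise_idxOf_dedup (colors : List Int) :
    (PySem.List.dedup colors).Pairwise (fun a b => colors.idxOf a < colors.idxOf b) := by
  induction colors using List.reverseRecOn with
  | nil => simp
  | append_singleton l c ih =>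
      have hstep : PySem.List.dedup (l ++ [c])
          = if c ∈ l then PySem.List.dedup l else PySem.List.dedup l ++ [c] := by
        simp only [PySem.List.dedup_eq_ofList, PySem.Set.ofList, List.foldl_append,
          List.foldl_cons, List.foldl_nil, PySem.Set.add]
        by_cases h : c ∈ l <;>
          simp [PySem.Set.contains, h, ← PySem.Set.ofList_eq_foldl, PySem.Set.mem_ofList]
      have hext : ∀ a ∈ PySem.List.dedup l, ∀ b ∈ PySem.List.dedup l,
          l.idxOf a < l.idxOf b → (l ++ [c]).idxOf a < (l ++ [c]).idxOf b := by
        intro a ha b hb hab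
        rw [List.idxOf_append_of_mem ((PySem.List.mem_dedup _ _).1 ha),
          List.idxOf_append_of_mem ((PySem.List.mem_dedup _ _).1 hb)]
        exact hab
      by_cases h : c ∈ l
      · rw [hstep, if_pos h]
        exact ih.imp_of_mem (fun {a b} ha hb => hext a ha b hb)
      · rw [hstep, if_neg h]
        refine List.pairwise_append.2 ⟨ih.imp_of_mem (fun {a b} ha hb => hext a ha b hb), ?_, ?_⟩
        · simp
        · intro a ha b hb
          rw [List.mem_singleton] at hb
          subst hb
          have h0 : List.idxOf b [b] = 0 := by simp
          rw [List.idxOf_append_of_mem ((PySem.List.mem_dedup _ _).1 ha),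
            List.idxOf_append_of_notMem h, h0]
          simpa using List.idxOf_lt_length_of_mem ((PySem.List.mem_dedup _ _).1 ha)

/-- B computes, position by position, the canonical index of each color. -/
lemma alt_eq_map (colors : List Int) :
    canonical_relabel_key_alt colors
      = colors.map (fun c => (((PySem.List.dedup colors).idxOf c : Int))) := by
  simp only [canonical_relabel_key_alt]
  set first : PySem.Dict Int Int :=
    ((PySem.List.enumerate colors).reverse).foldl (fun d p => d.insert p.2 p.1) PySem.Dict.empty
    with hfirst
  have hget : ∀ c, first.get? c
      = if c ∈ colors then some ((colors.idxOf c : Int)) else none := by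
    intro c
    rw [hfirst, get?_revEnumFold colors 0 PySem.Dict.empty c]
    simp [PySem.Dict.get?, PySem.Dict.empty]
  have hmemk : ∀ c, c ∈ first.keys ↔ c ∈ colors := by
    intro c
    constructor
    · intro hk
      by_contra hc
      exact ((PySem.Dict.get?_eq_none_iff_not_mem_keys first c).1 (by simp [hget c, hc])) hk
    · intro hc
      by_contra hk
      have := (PySem.Dict.get?_eq_none_iff_not_mem_keys first c).2 hk
      simp [hget c, hc] at this
  have hnodk : first.keys.Nodup := by
    rw [hfirst]
    exact PySem.Dict.nodup_keys_foldl_insert_key ((PySem.List.enumerate colors).reverse)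
      (fun p => p.2) (fun _ p => p.1) PySem.Dict.empty (by simp [PySem.Dict.keys, PySem.Dict.empty])
  have horder : PySem.List.sorted first.keys (fun c => (first.get? c).getD 0) false
      = PySem.List.dedup colors := by
    apply PySem.List.sorted_eq_of_perm_of_pairwise_lt
    · exact (List.perm_ext_iff_of_nodup (PySem.List.nodup_dedup colors) hnodk).2
        (fun a => by rw [PySem.List.mem_dedup, hmemk a])
    · refine (pairwise_idxOf_dedup colors).imp_of_mem ?_
      intro a b ha hb hab
      have ha' := (PySem.List.mem_dedup _ _).1 ha
      have hb' := (PySem.List.mem_dedup _ _).1 hb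
      simp only [hget, ha', hb', if_pos, Option.getD_some]
      exact_mod_cast hab
  rw [horder]
  refine List.map_congr_left ?_
  intro c hc
  rw [get?_buildMap (PySem.List.dedup colors) 0 PySem.Dict.empty c (PySem.List.nodup_dedup colors)]
  simp [hc]

-- ===== VERDICT (by name: the statement is the Claim_ definition above) =====
theorem canonical_relabel_key_spec : Claim_equal_canonical_relabel_key := by
  intro colors _
  show canonical_relabel_key colors = canonical_relabel_key_alt colors
  rw [a_eq_map, alt_eq_map]
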